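-- pv_equiv track=rewrite | github.com/ddzero2c/tmux-easymotion | easymotion.py | generate_hints
-- ===== SOURCE A (Python) =====
-- from typing import List, Optional
--
-- def generate_hints(keys: str, needed_count: Optional[int] = None) -> List[str]:
--     """Generate hints with optimal single/double key distribution"""
--     if not needed_count:
--         needed_count = len(keys) ** 2
--
--     keys_list = list(keys)
--     key_count = len(keys_list)
--     max_hints = key_count * key_count  # All possible double-char combinations
--
--     if needed_count > max_hints:
--         needed_count = max_hints
--
--     # When needed hints count is less than or equal to available keys, use single chars
--     if needed_count <= key_count:
--         return keys_list[:needed_count]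
--
--     # Generate all possible double char combinations
--     double_char_hints = []
--     for prefix in keys_list:
--         for suffix in keys_list:
--             double_char_hints.append(prefix + suffix)
--
--     # Dynamically calculate how many single chars to keep
--     single_chars = 0
--     for i in range(key_count, 0, -1):
--         if needed_count <= (key_count - i) * key_count + i:
--             single_chars = i
--             break
--
--     hints = []
--     # Add single chars at the beginning
--     single_char_hints = keys_list[:single_chars]
--     hints.extend(single_char_hints)
--
--     # Filter out double char hints that start with any single char hint
--     filtered_doubles = [h for h in double_char_hints if h[0] not in single_char_hints]
--
--     # Take needed doubles
--     needed_doubles = needed_count - single_chars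
--     hints.extend(filtered_doubles[:needed_doubles])
--
--     return hints[:needed_count]
-- ===== SOURCE B (Python) =====
-- from typing import List, Optional
--
-- def generate_hints(keys: str, needed_count: Optional[int] = None) -> List[str]:
--     """Generate hints with optimal single/double key distribution."""
--     if not needed_count:
--         needed_count = len(keys) ** 2
--     key_count = len(keys)
--     needed_count = min(needed_count, key_count * key_count)
--
--     if needed_count <= key_count:
--         return list(keys)[:needed_count]
--
--     # key_count >= 2 here; closed form for how many single-char hints to keep
--     single_chars = (key_count * key_count - needed_count) // (key_count - 1)
--     singles = list(keys[:single_chars])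
--     excluded = set(singles)
--     quota = needed_count - single_chars
--
--     doubles = []
--     for prefix in keys:
--         if prefix in excluded:
--             continue
--         if len(doubles) >= quota:
--             break
--         for suffix in keys:
--             if len(doubles) >= quota:
--                 break
--             doubles.append(prefix + suffix)
--     return singles + doubles
-- ===== Notes on version B (the rewrite author's own statement) =====
-- stated objective: simpler
-- what changed: Replaces the descending search loop by the closed form single_chars = (k*k - needed)//(k-1) and fuses the build-all-doubles / filter / slice passes into one generating loop with an excluded-prefix set and an early stop once the quota of doubles is reached.
import Mathlib
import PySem

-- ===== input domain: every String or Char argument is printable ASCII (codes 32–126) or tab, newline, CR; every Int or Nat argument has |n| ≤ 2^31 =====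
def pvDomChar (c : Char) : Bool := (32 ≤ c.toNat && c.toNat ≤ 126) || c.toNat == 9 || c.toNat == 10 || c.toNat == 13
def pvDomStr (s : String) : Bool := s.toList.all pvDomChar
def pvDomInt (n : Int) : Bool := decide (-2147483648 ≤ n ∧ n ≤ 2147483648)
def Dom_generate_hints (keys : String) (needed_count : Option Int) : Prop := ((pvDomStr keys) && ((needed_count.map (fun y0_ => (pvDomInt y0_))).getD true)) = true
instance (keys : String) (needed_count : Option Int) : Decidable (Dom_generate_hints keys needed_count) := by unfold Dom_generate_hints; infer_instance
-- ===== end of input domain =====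

-- B replaces A's descending search loop by a closed-form quotient and fuses A's
-- build-all-doubles / filter / slice passes into one generating loop with an early stop (objective: simpler).


-- ===== PORT A =====
-- A's 'for i in range(key_count, 0, -1): if …: single_chars = i; break' (single_chars starts at 0)
def findSingleA (n k : Int) : List Int → Int
  | [] => 0
  | i :: rest => if n ≤ (k - i) * k + i then i else findSingleA n k rest

-- chars stand for Python's 1-char strings; 'prefix + suffix' is kept as the pair and
-- rendered with String.ofList [p, s] exactly where Python holds the 2-char string
def generate_hints (keys : String) (needed_count : Option Int) : List String :=
  let nc : Int := match needed_count with
    | none => PySem.Str.len keys ^ 2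
    | some v => if v = 0 then PySem.Str.len keys ^ 2 else v
  let keys_list : List Char := keys.toList
  let key_count : Int := (keys_list.length : Int)
  let max_hints : Int := key_count * key_count
  let nc2 : Int := if nc > max_hints then max_hints else nc
  if nc2 ≤ key_count then
    (PySem.List.slice keys_list none (some nc2)).map (fun c => String.ofList [c])
  else
    let double_char_hints : List (Char × Char) :=
      keys_list.foldl (fun acc p => keys_list.foldl (fun acc2 s => acc2 ++ [(p, s)]) acc) []
    let single_chars : Int := findSingleA nc2 key_count (PySem.List.pyRange key_count 0 (-1))
    let single_char_hints : List Char := PySem.List.slice keys_list none (some single_chars)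
    let hints : List String := [] ++ single_char_hints.map (fun c => String.ofList [c])
    let filtered_doubles := double_char_hints.filter (fun h => decide (h.1 ∉ single_char_hints))
    let needed_doubles := nc2 - single_chars
    let hints2 := hints ++ (PySem.List.slice filtered_doubles none (some needed_doubles)).map (fun h => String.ofList [h.1, h.2])
    PySem.List.slice hints2 none (some nc2)

-- ===== PORT B =====
-- inner 'for suffix in keys: if len(doubles) >= quota: break; doubles.append(prefix+suffix)'
def innerB (p : Char) (quota : Int) (acc : List String) : List Char → List String
  | [] => acc
  | s :: rest => if quota ≤ (acc.length : Int) then acc else innerB p quota (acc ++ [String.ofList [p, s]]) rest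

-- outer 'for prefix in keys: continue / break / inner loop'
def outerB (suffixes : List Char) (excluded : PySem.Set Char) (quota : Int) (acc : List String) : List Char → List String
  | [] => acc
  | p :: rest =>
    if p ∈ excluded then outerB suffixes excluded quota acc rest
    else if quota ≤ (acc.length : Int) then acc
    else outerB suffixes excluded quota (innerB p quota acc suffixes) rest

def generate_hints_alt (keys : String) (needed_count : Option Int) : List String :=
  let nc : Int := match needed_count with
    | none => PySem.Str.len keys ^ 2
    | some v => if v = 0 then PySem.Str.len keys ^ 2 else v
  let key_count : Int := (keys.toList.length : Int)
  let n : Int := min nc (key_count * key_count)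
  if n ≤ key_count then
    (PySem.List.slice keys.toList none (some n)).map (fun c => String.ofList [c])
  else
    let single_chars : Int := PySem.Int.floordiv (key_count * key_count - n) (key_count - 1)
    let singlesC : List Char := PySem.List.slice keys.toList none (some single_chars)
    let singles : List String := singlesC.map (fun c => String.ofList [c])
    let excluded : PySem.Set Char := PySem.Set.ofList singlesC
    let quota : Int := n - single_chars
    singles ++ outerB keys.toList excluded quota [] keys.toList

-- ===== PRECONDITION & SPEC =====
def Spec_generate_hints (keys : String) (needed_count : Option Int) (out : List String) : Prop := out = generate_hints_alt keys needed_count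
instance (keys : String) (needed_count : Option Int) (out : List String) : Decidable (Spec_generate_hints keys needed_count out) := by unfold Spec_generate_hints; infer_instance

-- ===== CLAIM (what is proved, stated in full; the proofs are below) =====
def Claim_equal_generate_hints : Prop := ∀ (keys : String) (needed_count : Option Int), Dom_generate_hints keys needed_count → Spec_generate_hints keys needed_count (generate_hints keys needed_count)

-- ===== LEMMAS AND PROOFS =====
lemma pyRange_neg_one_cons (k : Int) (hk : 0 < k) :
    PySem.List.pyRange k 0 (-1) = k :: PySem.List.pyRange (k-1) 0 (-1) := by
  simp only [PySem.List.pyRange]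
  norm_num
  rcases lt_or_ge 1 k with h | h
  · rw [if_pos hk, if_pos h, show k.toNat = (k.toNat - 1) + 1 by omega, List.range_succ_eq_map]
    simp [List.map_map, Function.comp]
    intro j _
    ring
  · have hk1 : k = 1 := by omega
    subst hk1
    norm_num [List.range_succ_eq_map]

lemma findSingleA_range (n K m : Int) (hm : 0 ≤ m)
    (hiff : ∀ i : Int, (n ≤ (K - i) * K + i) ↔ i ≤ m) :
    ∀ c : Nat, findSingleA n K (PySem.List.pyRange (c : Int) 0 (-1)) = min m (c : Int) := by
  intro c
  induction c with
  | zero => simp [PySem.List.pyRange, findSingleA]; omega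
  | succ c ih =>
    rw [show ((c+1 : Nat) : Int) = (c : Int) + 1 by push_cast; ring]
    rw [pyRange_neg_one_cons _ (by positivity)]
    simp only [findSingleA, add_sub_cancel_right, ih]
    by_cases h : ((c : Int) + 1) ≤ m
    · rw [if_pos ((hiff _).mpr h)]; omega
    · rw [if_neg (fun hc => h ((hiff _).mp hc))]; omega

lemma innerB_eq (p : Char) (quota : Int) :
    ∀ (suf : List Char) (acc : List String),
    innerB p quota acc suf
      = acc ++ (suf.map (fun s => String.ofList [p, s])).take ((quota - acc.length).toNat) := by
  intro suf
  induction suf with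
  | nil => intro acc; simp [innerB]
  | cons s rest ih =>
    intro acc
    simp only [innerB]
    by_cases hq : quota ≤ (acc.length : Int)
    · rw [if_pos hq, show (quota - acc.length).toNat = 0 by omega]
      simp
    · rw [if_neg hq, ih]
      have h1 : ((acc ++ [String.ofList [p, s]]).length : Int) = acc.length + 1 := by
        simp
      rw [h1, show (quota - acc.length).toNat = (quota - (acc.length + 1)).toNat + 1 by omega]
      simp [List.take_succ_cons]

lemma outerB_eq (suf : List Char) (ex : PySem.Set Char) (quota : Int) :
    ∀ (pre : List Char) (acc : List String),
    outerB suf ex quota acc pre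
      = acc ++ ((pre.filter (fun p => decide (p ∉ ex))).flatMap
            (fun p => suf.map (fun s => String.ofList [p, s]))).take ((quota - acc.length).toNat) := by
  intro pre
  induction pre with
  | nil => intro acc; simp [outerB]
  | cons p rest ih =>
    intro acc
    simp only [outerB]
    by_cases hp : p ∈ ex
    · rw [if_pos hp, ih]
      simp [hp]
    · rw [if_neg hp]
      by_cases hq : quota ≤ (acc.length : Int)
      · rw [if_pos hq, show (quota - acc.length).toNat = 0 by omega]
        simp
      · rw [if_neg hq, ih, innerB_eq]
        simp only [List.filter_cons, decide_not, hp, decide_false, Bool.not_false, ite_true,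
          List.flatMap_cons, List.take_append, List.append_assoc]
        congr 2
        congr 1
        simp [List.length_take]
        omega

lemma filter_flatMap_fst (l l2 : List Char) (q : Char → Bool) :
    (l.flatMap (fun p => l2.map (fun s => (p, s)))).filter (fun h => q h.1)
      = (l.filter q).flatMap (fun p => l2.map (fun s => (p, s))) := by
  induction l with
  | nil => simp
  | cons p rest ih =>
    simp only [List.flatMap_cons, List.filter_append, ih, List.filter_cons]
    cases hq : q p with
    | true =>
      simp only [List.filter_map]
      simp [Function.comp_def, hq]
    | false =>
      simp only [List.filter_map]
      simp [Function.comp_def, hq]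

lemma doubles_fold (l : List Char) :
    l.foldl (fun acc p => l.foldl (fun acc2 s => acc2 ++ [(p, s)]) acc) ([] : List (Char × Char))
      = l.flatMap (fun p => l.map (fun s => (p, s))) := by
  simp only [PySem.List.foldl_append_singleton_eq_map]
  rw [PySem.List.foldl_append_eq_flatMap]
  simp

theorem gh_eq (keys : String) (needed_count : Option Int) :
    generate_hints keys needed_count = generate_hints_alt keys needed_count := by
  simp only [generate_hints, generate_hints_alt, PySem.Str.len_eq]
  set K : Int := (keys.toList.length : Int) with hK
  set nc : Int := (match needed_count with
    | none => K ^ 2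
    | some v => if v = 0 then K ^ 2 else v) with hnc
  have hclamp : (if nc > K * K then K * K else nc) = min nc (K * K) := by
    split_ifs <;> omega
  rw [hclamp]
  set n : Int := min nc (K * K) with hn
  by_cases hle : n ≤ K
  · simp [if_pos hle]
  · simp only [if_neg hle]
    have hK0 : (0:Int) ≤ K := by positivity
    have hnK : K < n := lt_of_not_ge hle
    have hnK2 : n ≤ K * K := min_le_right _ _
    have hK2 : 2 ≤ K := by nlinarith
    have hb : (0:Int) < K - 1 := by omega
    set m : Int := PySem.Int.floordiv (K * K - n) (K - 1) with hm
    have hm0 : (0:Int) ≤ m := by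
      rw [hm]
      rw [PySem.Int.le_floordiv_iff_mul_le hb]
      nlinarith
    have hmk : m < K := by
      rw [hm]
      rw [PySem.Int.floordiv_lt_iff_lt_mul hb]
      nlinarith
    have hiff : ∀ i : Int, (n ≤ (K - i) * K + i) ↔ i ≤ m := by
      intro i
      rw [hm, PySem.Int.le_floordiv_iff_mul_le hb]
      constructor <;> intro h <;> nlinarith
    have hfind : findSingleA n K (PySem.List.pyRange K 0 (-1)) = m := by
      obtain ⟨cn, hcn⟩ : ∃ cn : Nat, K = (cn : Int) := ⟨K.toNat, by omega⟩
      conv_lhs => rw [hcn]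
      rw [findSingleA_range n (↑cn) m hm0 (by rw [← hcn]; exact hiff) cn]
      omega
    rw [hfind, doubles_fold]
    have hmn : m ≤ n := by omega
    rw [PySem.List.slice_to _ hm0]
    rw [PySem.List.slice_to _ (by omega : (0:Int) ≤ n - m)]
    rw [PySem.List.slice_to _ (by omega : (0:Int) ≤ n)]
    rw [outerB_eq]
    rw [filter_flatMap_fst keys.toList keys.toList (fun c => decide (c ∉ keys.toList.take m.toNat))]
    rw [List.filter_congr (fun x _ => by
      simp only [PySem.Set.mem_ofList] :
      ∀ x ∈ keys.toList, (decide (x ∉ PySem.Set.ofList (keys.toList.take m.toNat)) : Bool)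
        = decide (x ∉ keys.toList.take m.toNat))]
    simp only [List.map_take, List.map_flatMap]
    simp only [List.map_map, Function.comp_def, List.nil_append, List.length_nil,
      Nat.cast_zero, sub_zero]
    apply List.take_of_length_le
    simp only [List.length_append, List.length_map, List.length_take, List.length_flatMap]
    omega

-- ===== VERDICT (by name: the statement is the Claim_ definition above) =====
theorem generate_hints_spec : Claim_equal_generate_hints := by
  intro keys needed_count _
  unfold Spec_generate_hints
  exact gh_eq keys needed_count
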